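-- pv_equiv track=rewrite | github.com/Nazgulitos/CrosswordGeneratorGAAlgorithm | main2.py | _is_grid_connected
-- ===== SOURCE A (Python) =====
-- def _is_grid_connected(grid):
--     """
--
--     :param grid:
--     :return:
--     """
--
--     adjacency_list = {i: [] for i in range(len(grid))}
--
--     for i, (word, start, orientation) in enumerate(grid):
--         for j, (other_word, other_start, other_orientation) in enumerate(grid[i + 1:]):
--             if orientation == 'h' and other_orientation == 'v':
--                 intersect = (start[0], other_start[1])
--                 if other_start[0] <= intersect[0] < other_start[0] + len(other_word) and start[1] <= intersect[1] < \
--                         start[1] + len(word):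
--                     adjacency_list[i].append(i + 1 + j)
--                     adjacency_list[i + 1 + j].append(i)
--
--             elif orientation == 'v' and other_orientation == 'h':
--                 intersect = (other_start[0], start[1])
--                 if other_start[1] <= intersect[1] < other_start[1] + len(other_word) and start[0] <= intersect[0] < \
--                         start[0] + len(word):
--                     adjacency_list[i].append(i + 1 + j)
--                     adjacency_list[i + 1 + j].append(i)
--
--     # Perform DFS to check connectivity
--     visited = set()
--
--     def dfs(node):
--         visited.add(node)
--         for neighbor in adjacency_list[node]:
--             if neighbor not in visited:
--                 dfs(neighbor)
--
--     # Start DFS from the first node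
--     dfs(0)
--
--     # Check if all nodes are visited
--     return len(visited) == len(grid)
-- ===== SOURCE B (Python) =====
-- def _is_grid_connected(grid):
--     n = len(grid)
--
--     def crosses(a, b):
--         wa, (ra, ca), oa = a
--         wb, (rb, cb), ob = b
--         if oa == 'h' and ob == 'v':
--             return rb <= ra < rb + len(wb) and ca <= cb < ca + len(wa)
--         if oa == 'v' and ob == 'h':
--             return ra <= rb < ra + len(wa) and cb <= ca < cb + len(wb)
--         return False
--
--     # mark the component of word 0 by monotone saturation sweeps, no adjacency lists
--     comp = [i == 0 for i in range(n)]
--     changed = True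
--     while changed:
--         changed = False
--         for j in range(n):
--             if not comp[j] and any(comp[i] and crosses(grid[i], grid[j]) for i in range(n)):
--                 comp[j] = True
--                 changed = True
--     return all(comp)
-- ===== Notes on version B (the rewrite author's own statement) =====
-- stated objective: alternative
-- what changed: replaces the adjacency-dict build plus recursive DFS by monotone boolean saturation sweeps (repeat until no change) over a pure pairwise crossing test, with no adjacency structure and no recursion
import Mathlib
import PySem

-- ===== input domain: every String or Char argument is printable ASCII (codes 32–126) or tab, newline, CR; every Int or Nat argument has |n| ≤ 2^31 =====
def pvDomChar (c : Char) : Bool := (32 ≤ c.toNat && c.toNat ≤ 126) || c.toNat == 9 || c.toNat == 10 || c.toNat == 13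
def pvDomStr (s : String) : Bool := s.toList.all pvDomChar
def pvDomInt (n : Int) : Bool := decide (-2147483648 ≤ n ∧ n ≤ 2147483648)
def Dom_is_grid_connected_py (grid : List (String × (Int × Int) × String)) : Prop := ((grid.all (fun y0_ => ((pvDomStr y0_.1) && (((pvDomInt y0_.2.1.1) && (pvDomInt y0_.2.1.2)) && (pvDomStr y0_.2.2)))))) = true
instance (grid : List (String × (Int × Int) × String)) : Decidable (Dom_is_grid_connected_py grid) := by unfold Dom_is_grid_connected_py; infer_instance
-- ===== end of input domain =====

-- B replaces A's adjacency-dict + recursive DFS by monotone saturation sweeps over a pure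
-- pairwise crossing test (objective: alternative, similar cost).

-- ===== PORT A =====

-- A's adjacency-dict build (the `adjacency_list` part of A, step for step; the Python
-- appends only at keys that are present, so `modify` with default [] is exact here).
def pvAdjA (grid : List (String × (Int × Int) × String)) : PySem.Dict Int (List Int) :=
  (PySem.List.enumerate grid).foldl (fun d p =>
    let i := p.1
    let word := p.2.1
    let start := p.2.2.1
    let orientation := p.2.2.2
    (PySem.List.enumerate (PySem.List.slice grid (some (i + 1)) none)).foldl (fun d q =>
      let j := q.1
      let other_word := q.2.1
      let other_start := q.2.2.1
      let other_orientation := q.2.2.2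
      if orientation == "h" && other_orientation == "v" then
        if other_start.1 ≤ start.1 ∧ start.1 < other_start.1 + PySem.Str.len other_word ∧
           start.2 ≤ other_start.2 ∧ other_start.2 < start.2 + PySem.Str.len word then
          (d.modify i [] (fun l => l ++ [i + 1 + j])).modify (i + 1 + j) [] (fun l => l ++ [i])
        else d
      else if orientation == "v" && other_orientation == "h" then
        if other_start.2 ≤ start.2 ∧ start.2 < other_start.2 + PySem.Str.len other_word ∧
           start.1 ≤ other_start.1 ∧ other_start.1 < start.1 + PySem.Str.len word then
          (d.modify i [] (fun l => l ++ [i + 1 + j])).modify (i + 1 + j) [] (fun l => l ++ [i])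
        else d
      else d) d)
    ((PySem.List.pyRange 0 (grid.length : Int)).foldl (fun d i => d.insert i ([] : List Int)) PySem.Dict.empty)

-- A's recursive dfs over the mutated `visited` set; the fuel argument only makes the
-- recursion total (it provably never runs out when called with grid.length + 1 below).
def pvDfsA (adj : PySem.Dict Int (List Int)) : Nat → PySem.Set Int → Int → PySem.Set Int
  | 0, visited, _ => visited
  | fuel + 1, visited, node =>
    (adj.getD node []).foldl
      (fun vis neighbor =>
        if PySem.Set.contains vis neighbor then vis else pvDfsA adj fuel vis neighbor)
      (PySem.Set.add visited node)

def is_grid_connected_py (grid : List (String × (Int × Int) × String)) : Bool :=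
  let visited := pvDfsA (pvAdjA grid) (grid.length + 1) PySem.Set.empty 0
  decide (visited.length = grid.length)

-- ===== PORT B =====

-- B's `crosses(a, b)`.
def pvCrosses (a b : String × (Int × Int) × String) : Bool :=
  if a.2.2 == "h" && b.2.2 == "v" then
    decide (b.2.1.1 ≤ a.2.1.1 ∧ a.2.1.1 < b.2.1.1 + PySem.Str.len b.1 ∧
            a.2.1.2 ≤ b.2.1.2 ∧ b.2.1.2 < a.2.1.2 + PySem.Str.len a.1)
  else if a.2.2 == "v" && b.2.2 == "h" then
    decide (a.2.1.1 ≤ b.2.1.1 ∧ b.2.1.1 < a.2.1.1 + PySem.Str.len a.1 ∧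
            b.2.1.2 ≤ a.2.1.2 ∧ a.2.1.2 < b.2.1.2 + PySem.Str.len b.1)
  else false

-- default entry for getD; B's Python indices are always in range, so it is never used
def pvDefEnt : String × (Int × Int) × String := ("", (0, 0), "")

-- one `for j in range(n)` sweep of B's while-loop body, carrying (comp, changed)
def pvSweep (grid : List (String × (Int × Int) × String)) (st : List Bool × Bool) :
    List Bool × Bool :=
  (List.range grid.length).foldl (fun st j =>
    if st.1.getD j false = false ∧
       (List.range grid.length).any (fun i =>
         st.1.getD i false && pvCrosses (grid.getD i pvDefEnt) (grid.getD j pvDefEnt)) then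
      (st.1.set j true, true)
    else st) st

-- B's `while changed` loop; the fuel only makes it total (grid.length + 1 provably suffices)
def pvLoopB (grid : List (String × (Int × Int) × String)) : Nat → List Bool → List Bool
  | 0, comp => comp
  | f + 1, comp =>
    let st := pvSweep grid (comp, false)
    if st.2 then pvLoopB grid f st.1 else st.1

def is_grid_connected_py_alt (grid : List (String × (Int × Int) × String)) : Bool :=
  let comp := (List.range grid.length).map (fun i => decide (i = 0))
  (pvLoopB grid (grid.length + 1) comp).all (fun b => b)

-- ===== PRECONDITION & SPEC =====

-- Pre_ excludes only the empty grid, on which A's dfs(0) raises KeyError.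
def Pre_is_grid_connected_py (grid : List (String × (Int × Int) × String)) : Prop := grid ≠ []
instance (grid : List (String × (Int × Int) × String)) : Decidable (Pre_is_grid_connected_py grid) := by unfold Pre_is_grid_connected_py; infer_instance

def pvWitness_is_grid_connected_py : (List (String × (Int × Int) × String)) := [("ab", (0, 0), "h")]

def Spec_is_grid_connected_py (grid : List (String × (Int × Int) × String)) (out : Bool) : Prop := out = is_grid_connected_py_alt grid
instance (grid : List (String × (Int × Int) × String)) (out : Bool) : Decidable (Spec_is_grid_connected_py grid out) := by unfold Spec_is_grid_connected_py; infer_instance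

-- ===== CLAIM (what is proved, stated in full; the proofs are below) =====
def Claim_equal_is_grid_connected_py : Prop := ∀ (grid : List (String × (Int × Int) × String)), Dom_is_grid_connected_py grid → Pre_is_grid_connected_py grid → Spec_is_grid_connected_py grid (is_grid_connected_py grid)

-- ===== LEMMAS AND PROOFS =====

-- entry at a Nat index (never out of range where used)
def pvEnt (grid : List (String × (Int × Int) × String)) (k : Nat) : String × (Int × Int) × String :=
  grid.getD k pvDefEnt

-- the crossing relation on word indices; both programs' edges are exactly this
def pvR (grid : List (String × (Int × Int) × String)) (u v : Nat) : Prop :=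
  u < grid.length ∧ v < grid.length ∧ pvCrosses (pvEnt grid u) (pvEnt grid v) = true

def pvReach (grid : List (String × (Int × Int) × String)) (v : Nat) : Prop :=
  Relation.ReflTransGen (pvR grid) 0 v

lemma pvCrosses_symm (a b : String × (Int × Int) × String) : pvCrosses a b = pvCrosses b a := by
  unfold pvCrosses
  by_cases h1 : a.2.2 = "h" <;> by_cases h2 : b.2.2 = "h" <;>
    by_cases h3 : a.2.2 = "v" <;> by_cases h4 : b.2.2 = "v" <;> simp_all

lemma pvCrosses_self (a : String × (Int × Int) × String) : pvCrosses a a = false := by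
  unfold pvCrosses
  by_cases h1 : a.2.2 = "h" <;> by_cases h3 : a.2.2 = "v" <;> simp_all

-- generic membership through a fold of dict-updating steps
lemma pv_foldl_getD_mem {γ : Type} (step : PySem.Dict Int (List Int) → γ → PySem.Dict Int (List Int))
    (Φ : γ → Int → Int → Prop) :
    ∀ (l : List γ),
      (∀ q ∈ l, ∀ d z x, x ∈ (step d q).getD z [] ↔ x ∈ d.getD z [] ∨ Φ q z x) →
      ∀ d z x, x ∈ (l.foldl step d).getD z [] ↔ x ∈ d.getD z [] ∨ ∃ q ∈ l, Φ q z x := by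
  intro l
  induction l with
  | nil => intro _ d z x; simp
  | cons q t ih =>
    intro hstep d z x
    simp only [List.foldl_cons]
    rw [ih (fun r hr => hstep r (by simp [hr])) (step d q) z x,
        hstep q (by simp) d z x]
    simp only [List.mem_cons, or_assoc]
    constructor
    · rintro (h | h | ⟨r, hr, hΦ⟩)
      · exact Or.inl h
      · exact Or.inr ⟨q, Or.inl rfl, h⟩
      · exact Or.inr ⟨r, Or.inr hr, hΦ⟩
    · rintro (h | ⟨r, (rfl | hr), hΦ⟩)
      · exact Or.inl h
      · exact Or.inr (Or.inl hΦ)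
      · exact Or.inr (Or.inr ⟨r, hr, hΦ⟩)

-- the initial {i: [] for i in range(n)} dict looks up to [] everywhere
lemma pv_getD_init_aux :
    ∀ (l : List Int) (d : PySem.Dict Int (List Int)),
      (∀ y, d.getD y ([] : List Int) = []) →
      ∀ z, (l.foldl (fun d i => d.insert i ([] : List Int)) d).getD z [] = [] := by
  intro l
  induction l with
  | nil => intro d h z; simpa using h z
  | cons i t ih =>
    intro d h z
    simp only [List.foldl_cons]
    refine ih _ (fun y => ?_) z
    rw [PySem.Dict.getD_insert]
    split
    · rfl
    · exact h y

lemma pv_getD_init (n : Int) (z : Int) :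
    ((PySem.List.pyRange 0 n).foldl (fun d i => d.insert i ([] : List Int)) PySem.Dict.empty).getD z [] = [] := by
  exact pv_getD_init_aux _ _ (fun y => by simp [pysem]) z

-- A's inner-loop branch test, as one boolean (proof-side restatement of the port's ifs)
def pvCondA (p q : Int × (String × (Int × Int) × String)) : Bool :=
  if p.2.2.2 == "h" && q.2.2.2 == "v" then
    decide (q.2.2.1.1 ≤ p.2.2.1.1 ∧ p.2.2.1.1 < q.2.2.1.1 + PySem.Str.len q.2.1 ∧
            p.2.2.1.2 ≤ q.2.2.1.2 ∧ q.2.2.1.2 < p.2.2.1.2 + PySem.Str.len p.2.1)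
  else if p.2.2.2 == "v" && q.2.2.2 == "h" then
    decide (q.2.2.1.2 ≤ p.2.2.1.2 ∧ p.2.2.1.2 < q.2.2.1.2 + PySem.Str.len q.2.1 ∧
            p.2.2.1.1 ≤ q.2.2.1.1 ∧ q.2.2.1.1 < p.2.2.1.1 + PySem.Str.len p.2.1)
  else false

lemma pvCondA_eq_crosses (p q : Int × (String × (Int × Int) × String)) :
    pvCondA p q = pvCrosses p.2 q.2 := by
  unfold pvCondA pvCrosses
  by_cases h1 : p.2.2.2 == "h" && q.2.2.2 == "v"
  · simp only [h1, if_true]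
  · simp only [h1]
    by_cases h2 : p.2.2.2 == "v" && q.2.2.2 == "h"
    · simp only [h2, if_true, if_false, Bool.false_eq_true]
      rw [Bool.eq_iff_iff]
      simp only [decide_eq_true_eq]
      tauto
    · simp [h2]

lemma pv_mem_modify2 (d : PySem.Dict Int (List Int)) (a b v w z x : Int) (hab : a ≠ b) :
    x ∈ ((d.modify a [] (fun l => l ++ [v])).modify b [] (fun l => l ++ [w])).getD z [] ↔
      x ∈ d.getD z [] ∨ (z = a ∧ x = v) ∨ (z = b ∧ x = w) := by
  simp only [PySem.Dict.getD_modify]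
  have hba : b ≠ a := Ne.symm hab
  by_cases hzb : z = b <;> by_cases hza : z = a <;>
    simp [hzb, hza, hab, hba, List.mem_append]

-- Φ of a single inner-loop step of A's build
def pvPhiI (p q : Int × (String × (Int × Int) × String)) (z x : Int) : Prop :=
  pvCondA p q = true ∧ ((z = p.1 ∧ x = p.1 + 1 + q.1) ∨ (z = p.1 + 1 + q.1 ∧ x = p.1))

-- Φ of a whole outer-loop step of A's build
def pvPhiO (grid : List (String × (Int × Int) × String))
    (p : Int × (String × (Int × Int) × String)) (z x : Int) : Prop :=
  ∃ q ∈ PySem.List.enumerate (PySem.List.slice grid (some (p.1 + 1)) none), pvPhiI p q z x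

-- membership after A's whole nested build loop
lemma pv_mem_adjA_raw (grid : List (String × (Int × Int) × String)) (z x : Int) :
    x ∈ (pvAdjA grid).getD z [] ↔
      ∃ p ∈ PySem.List.enumerate grid, pvPhiO grid p z x := by
  unfold pvAdjA
  rw [pv_foldl_getD_mem _ (pvPhiO grid) _ ?_ _ z x]
  · rw [pv_getD_init]
    simp
  · intro p hp d' z' x'
    dsimp only
    rw [pv_foldl_getD_mem _ (pvPhiI p) _ ?_ d' z' x']
    · rfl
    · intro q hq d'' z'' x''
      dsimp only
      obtain ⟨k, hk, rfl⟩ := (PySem.List.mem_enumerate_iff _ _ _).mp hq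
      have hne : p.1 + 1 + (0 + (k : Int)) ≠ p.1 := by omega
      by_cases hb1 : (p.2.2.2 == "h" && (PySem.List.slice grid (some (p.1 + 1)) none)[k].2.2 == "v") = true
      · simp only [hb1, if_true]
        by_cases hc1 : (PySem.List.slice grid (some (p.1 + 1)) none)[k].2.1.1 ≤ p.2.2.1.1 ∧
            p.2.2.1.1 < (PySem.List.slice grid (some (p.1 + 1)) none)[k].2.1.1 + PySem.Str.len (PySem.List.slice grid (some (p.1 + 1)) none)[k].1 ∧
            p.2.2.1.2 ≤ (PySem.List.slice grid (some (p.1 + 1)) none)[k].2.1.2 ∧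
            (PySem.List.slice grid (some (p.1 + 1)) none)[k].2.1.2 < p.2.2.1.2 + PySem.Str.len p.2.1
        · rw [if_pos hc1, pv_mem_modify2 _ _ _ _ _ _ _ (Ne.symm hne)]
          simp only [PySem.Str.len_eq, String.length_toList] at hc1
          simp [pvPhiI, pvCondA, hb1, hc1.1, hc1.2.1, hc1.2.2.1, hc1.2.2.2]
        · rw [if_neg hc1]
          simp only [PySem.Str.len_eq, String.length_toList] at hc1
          simp [pvPhiI, pvCondA, hb1, hc1]
      · simp only [hb1]
        by_cases hb2 : (p.2.2.2 == "v" && (PySem.List.slice grid (some (p.1 + 1)) none)[k].2.2 == "h") = true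
        · simp only [hb2, if_true, Bool.false_eq_true, if_false]
          by_cases hc2 : (PySem.List.slice grid (some (p.1 + 1)) none)[k].2.1.2 ≤ p.2.2.1.2 ∧
              p.2.2.1.2 < (PySem.List.slice grid (some (p.1 + 1)) none)[k].2.1.2 + PySem.Str.len (PySem.List.slice grid (some (p.1 + 1)) none)[k].1 ∧
              p.2.2.1.1 ≤ (PySem.List.slice grid (some (p.1 + 1)) none)[k].2.1.1 ∧
              (PySem.List.slice grid (some (p.1 + 1)) none)[k].2.1.1 < p.2.2.1.1 + PySem.Str.len p.2.1
          · rw [if_pos hc2, pv_mem_modify2 _ _ _ _ _ _ _ (Ne.symm hne)]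
            simp only [PySem.Str.len_eq, String.length_toList] at hc2
            simp [pvPhiI, pvCondA, hb1, hb2, hc2.1, hc2.2.1, hc2.2.2.1, hc2.2.2.2]
          · rw [if_neg hc2]
            simp only [PySem.Str.len_eq, String.length_toList] at hc2
            simp [pvPhiI, pvCondA, hb1, hb2, hc2]
        · simp only [hb2, Bool.false_eq_true, if_false]
          simp [pvPhiI, pvCondA, hb1, hb2]

-- ordered-pair form of adjacency membership
lemma pv_mem_adjA_pairs (grid : List (String × (Int × Int) × String)) (z x : Int) :
    x ∈ (pvAdjA grid).getD z [] ↔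
      ∃ a b : Nat, a < b ∧ b < grid.length ∧
        pvCrosses (pvEnt grid a) (pvEnt grid b) = true ∧
        ((z = (a : Int) ∧ x = (b : Int)) ∨ (z = (b : Int) ∧ x = (a : Int))) := by
  rw [pv_mem_adjA_raw]
  constructor
  · rintro ⟨p, hp, q, hq, hcond, hzx⟩
    obtain ⟨a, ha, rfl⟩ := (PySem.List.mem_enumerate_iff _ _ _).mp hp
    have hcast : (0 : Int) + (a : Int) + 1 = ((a + 1 : Nat) : Int) := by push_cast; ring
    rw [hcast, PySem.List.slice_from_natCast] at hq
    obtain ⟨k, hk, rfl⟩ := (PySem.List.mem_enumerate_iff _ _ _).mp hq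
    rw [List.length_drop] at hk
    rw [pvCondA_eq_crosses] at hcond
    refine ⟨a, a + 1 + k, by omega, by omega, ?_, ?_⟩
    · simp only [pvEnt]
      rw [List.getD_eq_getElem _ _ ha, List.getD_eq_getElem _ _ (by omega : a + 1 + k < grid.length)]
      simpa [List.getElem_drop] using hcond
    · push_cast
      omega
  · rintro ⟨a, b, hab, hbn, hcross, hzx⟩
    have han : a < grid.length := by omega
    have hcast : (0 : Int) + (a : Int) + 1 = ((a + 1 : Nat) : Int) := by push_cast; ring
    have hkb : b - a - 1 < (grid.drop (a + 1)).length := by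
      rw [List.length_drop]; omega
    refine ⟨((0 : Int) + (a : Int), grid[a]), (PySem.List.mem_enumerate_iff _ _ _).mpr ⟨a, han, rfl⟩,
      ((0 : Int) + ((b - a - 1 : Nat) : Int), (grid.drop (a + 1))[b - a - 1]), ?_, ?_, ?_⟩
    · rw [hcast, PySem.List.slice_from_natCast]
      exact (PySem.List.mem_enumerate_iff _ _ _).mpr ⟨b - a - 1, hkb, rfl⟩
    · rw [pvCondA_eq_crosses]
      have hdg : (grid.drop (a + 1))[b - a - 1] = grid[b]'hbn := by
        rw [List.getElem_drop]
        congr 1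
        omega
      simp only [hdg]
      simp only [pvEnt] at hcross
      rw [List.getD_eq_getElem _ _ han, List.getD_eq_getElem _ _ hbn] at hcross
      exact hcross
    · push_cast
      omega

-- membership in A's adjacency dict is exactly the crossing relation
lemma pv_mem_adjA (grid : List (String × (Int × Int) × String)) (z x : Int) :
    x ∈ (pvAdjA grid).getD z [] ↔ ∃ u v : Nat, z = (u : Int) ∧ x = (v : Int) ∧ pvR grid u v := by
  rw [pv_mem_adjA_pairs]
  constructor
  · rintro ⟨a, b, hab, hbn, hc, (⟨rfl, rfl⟩ | ⟨rfl, rfl⟩)⟩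
    · exact ⟨a, b, rfl, rfl, by omega, hbn, hc⟩
    · exact ⟨b, a, rfl, rfl, hbn, by omega, by rw [pvCrosses_symm]; exact hc⟩
  · rintro ⟨u, v, rfl, rfl, hu, hv, hc⟩
    have huv : u ≠ v := by
      rintro rfl
      rw [pvCrosses_self] at hc
      cases hc
    rcases Nat.lt_or_ge u v with hlt | hge
    · exact ⟨u, v, hlt, hv, hc, Or.inl ⟨rfl, rfl⟩⟩
    · exact ⟨v, u, by omega, hu, by rw [pvCrosses_symm]; exact hc, Or.inr ⟨rfl, rfl⟩⟩

-- number of not-yet-visited word indices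
def pvMissing (grid : List (String × (Int × Int) × String)) (vis : List Int) : Nat :=
  ((Finset.range grid.length).filter (fun u : Nat => (u : Int) ∉ vis)).card

lemma pvMissing_anti {grid : List (String × (Int × Int) × String)} {s t : List Int}
    (h : s ⊆ t) : pvMissing grid t ≤ pvMissing grid s := by
  apply Finset.card_le_card
  intro u hu
  simp only [Finset.mem_filter] at hu ⊢
  exact ⟨hu.1, fun hm => hu.2 (h hm)⟩

lemma pvMissing_add_lt {grid : List (String × (Int × Int) × String)} {vis : List Int} {w : Nat}
    (hw : w < grid.length) (hnot : (w : Int) ∉ vis) :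
    pvMissing grid (PySem.Set.add vis (w : Int)) < pvMissing grid vis := by
  have hadd : PySem.Set.add vis (w : Int) = vis ++ [(w : Int)] := by
    simp [PySem.Set.add, PySem.Set.contains, hnot]
  apply Finset.card_lt_card
  rw [Finset.ssubset_iff_of_subset]
  · refine ⟨w, ?_, ?_⟩
    · simp [Finset.mem_filter, hw, hnot]
    · simp [Finset.mem_filter, hadd]
  · intro u hu
    simp only [Finset.mem_filter, hadd, List.mem_append, List.mem_singleton] at hu ⊢
    exact ⟨hu.1, fun hm => hu.2 (Or.inl hm)⟩

-- the inner fold of one dfs level, with the level's invariants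
lemma pv_dfs_fold (grid : List (String × (Int × Int) × String)) (f : Nat)
    (IH : ∀ (vis : List Int) (node : Int), vis.Nodup → node ∉ vis →
      pvMissing grid vis < f →
      vis ⊆ pvDfsA (pvAdjA grid) f vis node ∧
      node ∈ pvDfsA (pvAdjA grid) f vis node ∧
      (pvDfsA (pvAdjA grid) f vis node).Nodup ∧
      (∀ x ∈ pvDfsA (pvAdjA grid) f vis node,
        x ∈ vis ∨ x = node ∨ ∃ u v : Nat, node = (u : Int) ∧ x = (v : Int) ∧
          Relation.ReflTransGen (pvR grid) u v) ∧
      (∀ x ∈ pvDfsA (pvAdjA grid) f vis node, x ∉ vis →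
        ∀ y ∈ (pvAdjA grid).getD x [], y ∈ pvDfsA (pvAdjA grid) f vis node))
    (w : Nat) (vis : List Int) :
    ∀ (l : List Int), (∀ y ∈ l, y ∈ (pvAdjA grid).getD ((w : Int)) []) →
    ∀ (s : List Int), s.Nodup → vis ⊆ s → ((w : Int)) ∈ s → pvMissing grid s < f →
    (∀ x ∈ s, x ∈ vis ∨ x = (w : Int) ∨ ∃ v : Nat, x = (v : Int) ∧
      Relation.ReflTransGen (pvR grid) w v) →
    (∀ x ∈ s, x ∉ vis → ∀ y ∈ (pvAdjA grid).getD x [], y ∈ s ∨ x = (w : Int)) →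
    s ⊆ (l.foldl (fun vis' neighbor => if PySem.Set.contains vis' neighbor then vis'
          else pvDfsA (pvAdjA grid) f vis' neighbor) s) ∧
    (l.foldl (fun vis' neighbor => if PySem.Set.contains vis' neighbor then vis'
          else pvDfsA (pvAdjA grid) f vis' neighbor) s).Nodup ∧
    pvMissing grid (l.foldl (fun vis' neighbor => if PySem.Set.contains vis' neighbor then vis'
          else pvDfsA (pvAdjA grid) f vis' neighbor) s) < f ∧
    (∀ x ∈ (l.foldl (fun vis' neighbor => if PySem.Set.contains vis' neighbor then vis'
          else pvDfsA (pvAdjA grid) f vis' neighbor) s),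
      x ∈ vis ∨ x = (w : Int) ∨ ∃ v : Nat, x = (v : Int) ∧
        Relation.ReflTransGen (pvR grid) w v) ∧
    (∀ x ∈ (l.foldl (fun vis' neighbor => if PySem.Set.contains vis' neighbor then vis'
          else pvDfsA (pvAdjA grid) f vis' neighbor) s), x ∉ vis →
      ∀ y ∈ (pvAdjA grid).getD x [], y ∈ (l.foldl (fun vis' neighbor =>
        if PySem.Set.contains vis' neighbor then vis'
          else pvDfsA (pvAdjA grid) f vis' neighbor) s) ∨ x = (w : Int)) ∧
    (∀ y ∈ l, y ∈ (l.foldl (fun vis' neighbor => if PySem.Set.contains vis' neighbor then vis'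
          else pvDfsA (pvAdjA grid) f vis' neighbor) s)) := by
  intro l
  induction l with
  | nil =>
    intro _ s hnd hvs hws hms hsound hclo
    simp only [List.foldl_nil]
    exact ⟨fun _ h => h, hnd, hms, hsound, fun x hx hxv y hy => (hclo x hx hxv y hy).imp id id,
      fun y hy => absurd hy (List.not_mem_nil)⟩
  | cons a t ih =>
    intro hl s hnd hvs hws hms hsound hclo
    simp only [List.foldl_cons]
    by_cases hca : PySem.Set.contains s a = true
    · rw [if_pos hca]
      have hres := ih (fun y hy => hl y (List.mem_cons_of_mem _ hy)) s hnd hvs hws hms hsound hclo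
      refine ⟨hres.1, hres.2.1, hres.2.2.1, hres.2.2.2.1, hres.2.2.2.2.1, ?_⟩
      intro y hy
      rcases List.mem_cons.mp hy with rfl | hyt
      · exact hres.1 ((PySem.Set.contains_iff _ _).mp hca)
      · exact hres.2.2.2.2.2 y hyt
    · rw [if_neg hca]
      have hans : a ∉ s := fun h => hca ((PySem.Set.contains_iff _ _).mpr h)
      have haw : a ∈ (pvAdjA grid).getD ((w : Int)) [] := hl a List.mem_cons_self
      obtain ⟨u, v, huw, rfl, hR⟩ := (pv_mem_adjA grid _ _).mp haw
      have huw' : w = u := by exact_mod_cast huw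
      subst huw'
      have hspec := IH s ((v : Int)) hnd hans hms
      obtain ⟨hsub', hmem', hnd', hsound', hclo'⟩ := hspec
      set r' := pvDfsA (pvAdjA grid) f s ((v : Int)) with hr'
      have hms' : pvMissing grid r' < f := lt_of_le_of_lt (pvMissing_anti hsub') hms
      have hsoundr' : ∀ x ∈ r', x ∈ vis ∨ x = (w : Int) ∨ ∃ v' : Nat, x = (v' : Int) ∧
          Relation.ReflTransGen (pvR grid) w v' := by
        intro x hx
        rcases hsound' x hx with hxs | rfl | ⟨u', v', huv, rfl, hRT⟩
        · exact hsound x hxs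
        · exact Or.inr (Or.inr ⟨v, rfl, Relation.ReflTransGen.single hR⟩)
        · have : v = u' := by exact_mod_cast huv
          subst this
          exact Or.inr (Or.inr ⟨v', rfl, Relation.ReflTransGen.head hR hRT⟩)
      have hclor' : ∀ x ∈ r', x ∉ vis → ∀ y ∈ (pvAdjA grid).getD x [], y ∈ r' ∨ x = (w : Int) := by
        intro x hx hxv y hy
        by_cases hxs : x ∈ s
        · rcases hclo x hxs hxv y hy with hys | hxw
          · exact Or.inl (hsub' hys)
          · exact Or.inr hxw
        · exact Or.inl (hclo' x hx hxs y hy)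
      have hres := ih (fun y hy => hl y (List.mem_cons_of_mem _ hy)) r' hnd'
        (fun y hy => hsub' (hvs hy)) (hsub' hws) hms' hsoundr' hclor'
      refine ⟨fun y hy => hres.1 (hsub' hy), hres.2.1, hres.2.2.1, hres.2.2.2.1,
        hres.2.2.2.2.1, ?_⟩
      intro y hy
      rcases List.mem_cons.mp hy with rfl | hyt
      · exact hres.1 hmem'
      · exact hres.2.2.2.2.2 y hyt

-- the full dfs specification: monotone, nodup, sound and neighbor-closed
lemma pv_dfs_spec (grid : List (String × (Int × Int) × String)) :
    ∀ (f : Nat) (vis : List Int) (node : Int), vis.Nodup → node ∉ vis →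
      pvMissing grid vis < f →
      vis ⊆ pvDfsA (pvAdjA grid) f vis node ∧
      node ∈ pvDfsA (pvAdjA grid) f vis node ∧
      (pvDfsA (pvAdjA grid) f vis node).Nodup ∧
      (∀ x ∈ pvDfsA (pvAdjA grid) f vis node,
        x ∈ vis ∨ x = node ∨ ∃ u v : Nat, node = (u : Int) ∧ x = (v : Int) ∧
          Relation.ReflTransGen (pvR grid) u v) ∧
      (∀ x ∈ pvDfsA (pvAdjA grid) f vis node, x ∉ vis →
        ∀ y ∈ (pvAdjA grid).getD x [], y ∈ pvDfsA (pvAdjA grid) f vis node) := by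
  intro f
  induction f with
  | zero => intro vis node _ _ hm; exact absurd hm (Nat.not_lt_zero _)
  | succ f ihf =>
    intro vis node hnd hnode hm
    simp only [pvDfsA]
    by_cases hnat : ∃ w : Nat, w < grid.length ∧ node = (w : Int)
    · obtain ⟨w, hw, rfl⟩ := hnat
      have hadd : PySem.Set.add vis ((w : Int)) = vis ++ [(w : Int)] := by
        simp [PySem.Set.add, PySem.Set.contains, hnode]
      have hnd0 : (PySem.Set.add vis ((w : Int))).Nodup := by
        rw [hadd]
        simp only [List.nodup_append, List.nodup_cons]
        exact ⟨hnd, by simp, fun a ha b hb heq => hnode (by simp only [List.mem_singleton] at hb; subst hb; exact heq ▸ ha)⟩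
      have hvs0 : vis ⊆ PySem.Set.add vis ((w : Int)) := by
        intro y hy; rw [hadd]; exact List.mem_append_left _ hy
      have hws0 : ((w : Int)) ∈ PySem.Set.add vis ((w : Int)) := by rw [hadd]; simp
      have hm0 : pvMissing grid (PySem.Set.add vis ((w : Int))) < f := by
        have h1 := pvMissing_add_lt hw hnode
        omega
      have hsound0 : ∀ x ∈ PySem.Set.add vis ((w : Int)), x ∈ vis ∨ x = (w : Int) ∨
          ∃ v : Nat, x = (v : Int) ∧ Relation.ReflTransGen (pvR grid) w v := by
        intro x hx
        rw [hadd] at hx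
        rcases List.mem_append.mp hx with h | h
        · exact Or.inl h
        · exact Or.inr (Or.inl (by simpa using h))
      have hclo0 : ∀ x ∈ PySem.Set.add vis ((w : Int)), x ∉ vis →
          ∀ y ∈ (pvAdjA grid).getD x [], y ∈ PySem.Set.add vis ((w : Int)) ∨ x = (w : Int) := by
        intro x hx hxv _ _
        rw [hadd] at hx
        rcases List.mem_append.mp hx with h | h
        · exact absurd h hxv
        · exact Or.inr (by simpa using h)
      have hres := pv_dfs_fold grid f ihf w vis ((pvAdjA grid).getD ((w : Int)) [])
        (fun _ hy => hy) _ hnd0 hvs0 hws0 hm0 hsound0 hclo0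
      refine ⟨fun y hy => hres.1 (hvs0 hy), hres.1 hws0, hres.2.1, ?_, ?_⟩
      · intro x hx
        rcases hres.2.2.2.1 x hx with h | h | ⟨v, rfl, hRT⟩
        · exact Or.inl h
        · exact Or.inr (Or.inl h)
        · exact Or.inr (Or.inr ⟨w, v, rfl, rfl, hRT⟩)
      · intro x hx hxv y hy
        rcases hres.2.2.2.2.1 x hx hxv y hy with h | h
        · exact h
        · rw [h] at hy
          exact hres.2.2.2.2.2 y hy
    · have hemp : (pvAdjA grid).getD node [] = [] := by
        rw [List.eq_nil_iff_forall_not_mem]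
        intro y hy
        obtain ⟨u, v, rfl, _, hR⟩ := (pv_mem_adjA grid _ _).mp hy
        exact hnat ⟨u, hR.1, rfl⟩
      rw [hemp]
      simp only [List.foldl_nil]
      have hadd : PySem.Set.add vis node = vis ++ [node] := by
        simp [PySem.Set.add, PySem.Set.contains, hnode]
      rw [hadd]
      refine ⟨fun y hy => List.mem_append_left _ hy, by simp, ?_, ?_, ?_⟩
      · simp only [List.nodup_append, List.nodup_cons]
        exact ⟨hnd, by simp, fun a ha b hb heq => hnode (by simp only [List.mem_singleton] at hb; subst hb; exact heq ▸ ha)⟩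
      · intro x hx
        rcases List.mem_append.mp hx with h | h
        · exact Or.inl h
        · exact Or.inr (Or.inl (by simpa using h))
      · intro x hx hxv y hy
        rcases List.mem_append.mp hx with h | h
        · exact absurd h hxv
        · have hxn : x = node := by simpa using h
          rw [hxn, hemp] at hy
          exact absurd hy (List.not_mem_nil)

-- A's visited set is exactly the reachable word indices
lemma pv_visitedA (grid : List (String × (Int × Int) × String)) (h : grid ≠ []) :
    (pvDfsA (pvAdjA grid) (grid.length + 1) PySem.Set.empty 0).Nodup ∧
    ∀ x, x ∈ pvDfsA (pvAdjA grid) (grid.length + 1) PySem.Set.empty 0 ↔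
      ∃ v : Nat, v < grid.length ∧ x = (v : Int) ∧ pvReach grid v := by
  have hn : 0 < grid.length := List.length_pos_iff.mpr h
  have hm : pvMissing grid ([] : List Int) < grid.length + 1 := by
    unfold pvMissing
    simpa using Nat.lt_succ_of_le (Finset.card_filter_le _ _)
  obtain ⟨hsub, hmem, hnd, hsound, hclo⟩ :=
    pv_dfs_spec grid (grid.length + 1) [] 0 List.nodup_nil (List.not_mem_nil) hm
  have hcomp : ∀ v : Nat, Relation.ReflTransGen (pvR grid) 0 v →
      ((v : Int)) ∈ pvDfsA (pvAdjA grid) (grid.length + 1) PySem.Set.empty 0 := by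
    intro v hRT
    induction hRT with
    | refl => simpa using hmem
    | @tail b c hab hbc ih =>
      exact hclo _ ih (List.not_mem_nil) _ ((pv_mem_adjA grid _ _).mpr ⟨b, c, rfl, rfl, hbc⟩)
  refine ⟨hnd, fun x => ⟨?_, ?_⟩⟩
  · intro hx
    rcases hsound x hx with h0 | rfl | ⟨u, v, hu, rfl, hRT⟩
    · exact absurd h0 (List.not_mem_nil)
    · exact ⟨0, hn, by simp, Relation.ReflTransGen.refl⟩
    · have hu0 : u = 0 := by exact_mod_cast hu.symm
      subst hu0
      refine ⟨v, ?_, rfl, hRT⟩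
      rcases Relation.ReflTransGen.cases_tail hRT with heq | ⟨c, _, hR⟩
      · omega
      · exact hR.2.1
  · rintro ⟨v, hv, rfl, hRT⟩
    exact hcomp v hRT

lemma pv_A_iff (grid : List (String × (Int × Int) × String)) (h : grid ≠ []) :
    is_grid_connected_py grid = true ↔ ∀ v < grid.length, pvReach grid v := by
  have hn : 0 < grid.length := List.length_pos_iff.mpr h
  obtain ⟨hnd, hchar⟩ := pv_visitedA grid h
  set r := pvDfsA (pvAdjA grid) (grid.length + 1) PySem.Set.empty 0 with hr
  have hMnd : ((List.range grid.length).map (fun k : Nat => (k : Int))).Nodup :=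
    List.Nodup.map (fun a b hab => by exact_mod_cast hab) List.nodup_range
  have hrM : r ⊆ (List.range grid.length).map (fun k : Nat => (k : Int)) := by
    intro x hx
    obtain ⟨v, hv, rfl, _⟩ := (hchar x).mp hx
    exact List.mem_map.mpr ⟨v, List.mem_range.mpr hv, rfl⟩
  unfold is_grid_connected_py
  rw [← hr]
  simp only [decide_eq_true_eq]
  constructor
  · intro hlen v hv
    by_contra hnr
    have hvr : ((v : Int)) ∉ r := by
      intro hin
      obtain ⟨v', _, hveq, hRT⟩ := (hchar _).mp hin
      have : v' = v := by exact_mod_cast hveq.symm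
      exact hnr (this ▸ hRT)
    have hsub2 : r ⊆ ((List.range grid.length).map (fun k : Nat => (k : Int))).erase ((v : Int)) := by
      intro x hx
      exact (List.mem_erase_of_ne (fun hxy : x = ((v : Int)) => hvr (hxy ▸ hx))).mpr (hrM hx)
    have hlen2 := (List.Nodup.subperm hnd hsub2).length_le
    have hveM : ((v : Int)) ∈ (List.range grid.length).map (fun k : Nat => (k : Int)) :=
      List.mem_map.mpr ⟨v, List.mem_range.mpr hv, rfl⟩
    rw [List.length_erase_of_mem hveM] at hlen2
    simp only [List.length_map, List.length_range] at hlen2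
    omega
  · intro hreach
    have hMr : ((List.range grid.length).map (fun k : Nat => (k : Int))) ⊆ r := by
      intro x hx
      obtain ⟨v, hv, rfl⟩ := List.mem_map.mp hx
      exact (hchar _).mpr ⟨v, List.mem_range.mp hv, rfl, hreach v (List.mem_range.mp hv)⟩
    have h1 := (List.Nodup.subperm hnd hrM).length_le
    have h2 := (List.Nodup.subperm hMnd hMr).length_le
    simp only [List.length_map, List.length_range] at h1 h2
    omega

-- ----- B side -----

def pvSound (grid : List (String × (Int × Int) × String)) (c : List Bool) : Prop :=
  ∀ j, c.getD j false = true → pvReach grid j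

def pvTrueCnt (grid : List (String × (Int × Int) × String)) (c : List Bool) : Nat :=
  ((Finset.range grid.length).filter (fun j => c.getD j false = true)).card

def pvClosed (grid : List (String × (Int × Int) × String)) (c : List Bool) : Prop :=
  ∀ j < grid.length, c.getD j false = false →
    ∀ i < grid.length, ¬(c.getD i false = true ∧ pvCrosses (pvEnt grid i) (pvEnt grid j) = true)

lemma pv_getD_set (c : List Bool) (j k : Nat) :
    (c.set j true).getD k false = if k = j ∧ j < c.length then true else c.getD k false := by
  by_cases hkj : k = j
  · subst hkj
    by_cases hk : k < c.length
    · simp [List.getD, List.getElem?_set, hk]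
    · simp [List.getD, hk, List.getElem?_eq_none (by omega : c.length ≤ k)]
  · simp [List.getD, List.getElem?_set, hkj, Ne.symm hkj]

lemma pvTrueCnt_mono {grid : List (String × (Int × Int) × String)} {c c' : List Bool}
    (h : ∀ j, c.getD j false = true → c'.getD j false = true) :
    pvTrueCnt grid c ≤ pvTrueCnt grid c' := by
  apply Finset.card_le_card
  intro j hj
  simp only [Finset.mem_filter] at hj ⊢
  exact ⟨hj.1, h j hj.2⟩

lemma pvTrueCnt_set_lt {grid : List (String × (Int × Int) × String)} {c : List Bool} {j : Nat}
    (hj : j < grid.length) (hlen : c.length = grid.length) (hf : c.getD j false = false) :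
    pvTrueCnt grid c < pvTrueCnt grid (c.set j true) := by
  apply Finset.card_lt_card
  rw [Finset.ssubset_iff_of_subset]
  · refine ⟨j, ?_, ?_⟩
    · simp [Finset.mem_filter, hj, pv_getD_set, hlen]
    · simp only [Finset.mem_filter, Finset.mem_range, not_and]
      exact fun _ => by simpa [List.getD] using hf
  · intro k hk
    simp only [Finset.mem_filter, pv_getD_set] at hk ⊢
    refine ⟨hk.1, ?_⟩
    split
    · rfl
    · exact hk.2

lemma pvTrueCnt_le {grid : List (String × (Int × Int) × String)} (c : List Bool) :
    pvTrueCnt grid c ≤ grid.length := by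
  simpa using Finset.card_filter_le (Finset.range grid.length) _

-- flag-true persistence through the sweep fold
lemma pv_fold_flag (grid : List (String × (Int × Int) × String)) :
    ∀ (l : List Nat) (c : List Bool),
      (l.foldl (fun st j =>
        if st.1.getD j false = false ∧
           (List.range grid.length).any (fun i =>
             st.1.getD i false && pvCrosses (grid.getD i pvDefEnt) (grid.getD j pvDefEnt)) then
          (st.1.set j true, true)
        else st) (c, true)).2 = true := by
  intro l
  induction l with
  | nil => intro c; rfl
  | cons j t ih =>
    intro c
    simp only [List.foldl_cons]
    split
    · exact ih _
    · exact ih _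

-- a sweep fold that reports no change did nothing and found no firing condition
lemma pv_fold_unchanged (grid : List (String × (Int × Int) × String)) :
    ∀ (l : List Nat) (c : List Bool),
      (l.foldl (fun st j =>
        if st.1.getD j false = false ∧
           (List.range grid.length).any (fun i =>
             st.1.getD i false && pvCrosses (grid.getD i pvDefEnt) (grid.getD j pvDefEnt)) then
          (st.1.set j true, true)
        else st) (c, false)).2 = false →
      (l.foldl (fun st j =>
        if st.1.getD j false = false ∧
           (List.range grid.length).any (fun i =>
             st.1.getD i false && pvCrosses (grid.getD i pvDefEnt) (grid.getD j pvDefEnt)) then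
          (st.1.set j true, true)
        else st) (c, false)).1 = c ∧
      ∀ j ∈ l, ¬(c.getD j false = false ∧
        (List.range grid.length).any (fun i =>
          c.getD i false && pvCrosses (grid.getD i pvDefEnt) (grid.getD j pvDefEnt)) = true) := by
  intro l
  induction l with
  | nil => intro c _; exact ⟨rfl, by simp⟩
  | cons j t ih =>
    intro c hflag
    simp only [List.foldl_cons] at hflag ⊢
    by_cases hc : c.getD j false = false ∧
        (List.range grid.length).any (fun i =>
          c.getD i false && pvCrosses (grid.getD i pvDefEnt) (grid.getD j pvDefEnt)) = true
    · rw [if_pos hc] at hflag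
      exact absurd (pv_fold_flag grid t _) (by rw [hflag]; simp)
    · rw [if_neg hc] at hflag ⊢
      obtain ⟨h1, h2⟩ := ih c hflag
      refine ⟨h1, fun j' hj' => ?_⟩
      rcases List.mem_cons.mp hj' with rfl | hj't
      · exact hc
      · exact h2 j' hj't

-- the sweep fold preserves length, truth and soundness; a set flag means strict growth
lemma pv_fold_progress (grid : List (String × (Int × Int) × String)) :
    ∀ (l : List Nat), (∀ j ∈ l, j < grid.length) →
    ∀ (c0 c : List Bool) (b : Bool),
      c.length = grid.length → pvSound grid c →
      (∀ j, c0.getD j false = true → c.getD j false = true) →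
      (b = true → pvTrueCnt grid c0 < pvTrueCnt grid c) →
      (l.foldl (fun st j =>
        if st.1.getD j false = false ∧
           (List.range grid.length).any (fun i =>
             st.1.getD i false && pvCrosses (grid.getD i pvDefEnt) (grid.getD j pvDefEnt)) then
          (st.1.set j true, true)
        else st) (c, b)).1.length = grid.length ∧
      pvSound grid (l.foldl (fun st j =>
        if st.1.getD j false = false ∧
           (List.range grid.length).any (fun i =>
             st.1.getD i false && pvCrosses (grid.getD i pvDefEnt) (grid.getD j pvDefEnt)) then
          (st.1.set j true, true)
        else st) (c, b)).1 ∧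
      (∀ j, c0.getD j false = true → (l.foldl (fun st j =>
        if st.1.getD j false = false ∧
           (List.range grid.length).any (fun i =>
             st.1.getD i false && pvCrosses (grid.getD i pvDefEnt) (grid.getD j pvDefEnt)) then
          (st.1.set j true, true)
        else st) (c, b)).1.getD j false = true) ∧
      ((l.foldl (fun st j =>
        if st.1.getD j false = false ∧
           (List.range grid.length).any (fun i =>
             st.1.getD i false && pvCrosses (grid.getD i pvDefEnt) (grid.getD j pvDefEnt)) then
          (st.1.set j true, true)
        else st) (c, b)).2 = true →
        pvTrueCnt grid c0 < pvTrueCnt grid (l.foldl (fun st j =>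
        if st.1.getD j false = false ∧
           (List.range grid.length).any (fun i =>
             st.1.getD i false && pvCrosses (grid.getD i pvDefEnt) (grid.getD j pvDefEnt)) then
          (st.1.set j true, true)
        else st) (c, b)).1) := by
  intro l
  induction l with
  | nil =>
    intro _ c0 c b hlen hs hm hb
    exact ⟨hlen, hs, hm, hb⟩
  | cons j t ih =>
    intro hlt c0 c b hlen hs hm hb
    have hjn : j < grid.length := hlt j List.mem_cons_self
    simp only [List.foldl_cons]
    by_cases hc : c.getD j false = false ∧
        (List.range grid.length).any (fun i =>
          c.getD i false && pvCrosses (grid.getD i pvDefEnt) (grid.getD j pvDefEnt)) = true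
    · rw [if_pos hc]
      have hreach : pvReach grid j := by
        obtain ⟨i, hi, hib⟩ := List.any_eq_true.mp hc.2
        rw [Bool.and_eq_true] at hib
        have hin : i < grid.length := List.mem_range.mp hi
        exact Relation.ReflTransGen.tail (hs i hib.1) ⟨hin, hjn, hib.2⟩
      have hs' : pvSound grid (c.set j true) := by
        intro k hk
        rw [pv_getD_set] at hk
        by_cases hkj : k = j ∧ j < c.length
        · exact hkj.1 ▸ hreach
        · rw [if_neg hkj] at hk
          exact hs k hk
      have hm' : ∀ k, c0.getD k false = true → (c.set j true).getD k false = true := by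
        intro k hk
        rw [pv_getD_set]
        split
        · rfl
        · exact hm k hk
      have hcnt : pvTrueCnt grid c0 < pvTrueCnt grid (c.set j true) :=
        lt_of_le_of_lt (pvTrueCnt_mono hm) (pvTrueCnt_set_lt hjn hlen hc.1)
      exact ih (fun j' hj' => hlt j' (List.mem_cons_of_mem _ hj')) c0 (c.set j true) true
        (by rw [List.length_set]; exact hlen) hs' hm' (fun _ => hcnt)
    · rw [if_neg hc]
      exact ih (fun j' hj' => hlt j' (List.mem_cons_of_mem _ hj')) c0 c b hlen hs hm hb

lemma pv_loopB_spec (grid : List (String × (Int × Int) × String)) :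
    ∀ (f : Nat) (c : List Bool), c.length = grid.length → pvSound grid c →
      grid.length - pvTrueCnt grid c < f →
      (pvLoopB grid f c).length = grid.length ∧
      pvSound grid (pvLoopB grid f c) ∧
      (∀ j, c.getD j false = true → (pvLoopB grid f c).getD j false = true) ∧
      pvClosed grid (pvLoopB grid f c) := by
  intro f
  induction f with
  | zero => intro c _ _ hfuel; exact absurd hfuel (Nat.not_lt_zero _)
  | succ f ihf =>
    intro c hlen hs hfuel
    simp only [pvLoopB, pvSweep]
    have hprog := pv_fold_progress grid (List.range grid.length)
      (fun j hj => List.mem_range.mp hj) c c false hlen hs (fun _ h => h) (by simp)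
    by_cases hst : ((List.range grid.length).foldl (fun st j =>
        if st.1.getD j false = false ∧
           (List.range grid.length).any (fun i =>
             st.1.getD i false && pvCrosses (grid.getD i pvDefEnt) (grid.getD j pvDefEnt)) then
          (st.1.set j true, true)
        else st) (c, false)).2 = true
    · rw [if_pos hst]
      have hcnt := hprog.2.2.2 hst
      have hle := pvTrueCnt_le (grid := grid) ((List.range grid.length).foldl (fun st j =>
        if st.1.getD j false = false ∧
           (List.range grid.length).any (fun i =>
             st.1.getD i false && pvCrosses (grid.getD i pvDefEnt) (grid.getD j pvDefEnt)) then
          (st.1.set j true, true)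
        else st) (c, false)).1
      have hres := ihf _ hprog.1 hprog.2.1 (by omega)
      exact ⟨hres.1, hres.2.1,
        fun j hj => hres.2.2.1 j (hprog.2.2.1 j hj), hres.2.2.2⟩
    · rw [if_neg hst]
      obtain ⟨heq, hnone⟩ := pv_fold_unchanged grid (List.range grid.length) c
        (by revert hst; cases ((List.range grid.length).foldl (fun st j =>
        if st.1.getD j false = false ∧
           (List.range grid.length).any (fun i =>
             st.1.getD i false && pvCrosses (grid.getD i pvDefEnt) (grid.getD j pvDefEnt)) then
          (st.1.set j true, true)
        else st) (c, false)).2 <;> simp)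
      rw [heq]
      refine ⟨hlen, hs, fun _ h => h, ?_⟩
      intro j hj hjf i hi ⟨hit, hcross⟩
      have := hnone j (List.mem_range.mpr hj)
      apply this
      refine ⟨hjf, List.any_eq_true.mpr ⟨i, List.mem_range.mpr hi, ?_⟩⟩
      rw [Bool.and_eq_true]
      exact ⟨hit, hcross⟩

lemma pv_B_iff (grid : List (String × (Int × Int) × String)) (h : grid ≠ []) :
    is_grid_connected_py_alt grid = true ↔ ∀ v < grid.length, pvReach grid v := by
  have hn : 0 < grid.length := List.length_pos_iff.mpr h
  have hlen0 : ((List.range grid.length).map (fun i => decide (i = 0))).length = grid.length := by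
    simp
  have hgetlt : ∀ j < grid.length,
      ((List.range grid.length).map (fun i => decide (i = 0))).getD j false = decide (j = 0) := by
    intro j hj
    rw [List.getD_eq_getElem _ _ (by rw [hlen0]; exact hj)]
    simp
  have hsound0 : pvSound grid ((List.range grid.length).map (fun i => decide (i = 0))) := by
    intro j hj
    by_cases hjn : j < grid.length
    · rw [hgetlt j hjn] at hj
      have : j = 0 := by simpa using hj
      subst this
      exact Relation.ReflTransGen.refl
    · rw [List.getD_eq_default _ _ (by omega : ((List.range grid.length).map
        (fun i => decide (i = 0))).length ≤ j)] at hj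
      exact absurd hj (by simp)
  have hspec := pv_loopB_spec grid (grid.length + 1)
    ((List.range grid.length).map (fun i => decide (i = 0))) hlen0 hsound0 (by omega)
  set r := pvLoopB grid (grid.length + 1)
    ((List.range grid.length).map (fun i => decide (i = 0))) with hrdef
  have h0r : r.getD 0 false = true := hspec.2.2.1 0 (by rw [hgetlt 0 hn]; simp)
  have hcompB : ∀ v, pvReach grid v → r.getD v false = true := by
    intro v hRT
    induction hRT with
    | refl => exact h0r
    | @tail b cc hab hbc ih =>
      by_cases hcf : r.getD cc false = true
      · exact hcf
      · exact absurd ⟨ih, hbc.2.2⟩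
          (hspec.2.2.2 cc hbc.2.1 (Bool.eq_false_iff.mpr hcf) b hbc.1)
  unfold is_grid_connected_py_alt
  show ((pvLoopB grid (grid.length + 1)
    ((List.range grid.length).map (fun i => decide (i = 0)))).all (fun b => b)) = true ↔ _
  rw [← hrdef, List.all_eq_true]
  constructor
  · intro hall v hv
    refine hspec.2.1 v ?_
    rw [List.getD_eq_getElem _ _ (by rw [hspec.1]; exact hv)]
    exact hall _ (List.getElem_mem _)
  · intro hreach x hx
    obtain ⟨j, hj, rfl⟩ := List.mem_iff_getElem.mp hx
    have hjn : j < grid.length := by rw [← hspec.1]; exact hj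
    have hjt := hcompB j (hreach j hjn)
    rw [List.getD_eq_getElem _ _ hj] at hjt
    exact hjt

-- ===== VERDICT (by name: the statement is the Claim_ definition above) =====
theorem is_grid_connected_py_spec : Claim_equal_is_grid_connected_py := by
  intro grid _ hpre
  unfold Spec_is_grid_connected_py
  have hA := pv_A_iff grid hpre
  have hB := pv_B_iff grid hpre
  by_cases hc : ∀ v < grid.length, pvReach grid v
  · rw [hA.mpr hc, hB.mpr hc]
  · have h1 : is_grid_connected_py grid = false := by
      cases h : is_grid_connected_py grid
      · rfl
      · exact absurd (hA.mp h) hc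
    have h2 : is_grid_connected_py_alt grid = false := by
      cases h : is_grid_connected_py_alt grid
      · rfl
      · exact absurd (hB.mp h) hc
    rw [h1, h2]
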